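-- pv_equiv track=rewrite | github.com/Dumgard/MiscRepo | AB_algorithm_diagnostics.py | group_distribution_v2
-- ===== SOURCE A (Python) =====
-- def _id_to_group_encode_v2(_id: int):
--     res = 0
--     while _id > 0:
--         res += _id % 10
--         _id = _id // 10
--     return res
--
-- def group_distribution_v2(n_customers: int,
--                           n_first_id: int = 0,
--                           ) -> list[float]:
--     """
--         This function calculates distribution of people among the groups
--     in case numeration starts from n_first_id and goes to (n_customers + n_first_id - 1)
--
--     :param n_customers:     Total number of people that should be distributed
--     :param n_first_id:      Starting point of numeration, 0 by default
--                                 (it provides solution for both tasks then/)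
--     :return:                List, where List[I] is a fraction that group I makes
--                                 up of the total number of customers
--     """
--
--     ans = [0] * (len(str(n_customers)) * 9 + 1)
--
--     for i in map(_id_to_group_encode_v2, range(n_first_id, n_customers + n_first_id)):
--         ans[i] += 1
--
--     while ans[-1] == 0:
--         ans.pop()
--
--     return ans
-- ===== SOURCE B (Python) =====
-- def _digit_sum(n: int) -> int:
--     s = 0
--     while n > 0:
--         s += n % 10
--         n //= 10
--     return s
--
--
-- def _counts_below(x: int) -> list:
--     """Table c with c[t] = #{n in [0, x) : digit_sum(n) = t}, built by digit DP.
--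
--     Length is 9 * (number of base-10 digits of x); every n < x has digit sum
--     below that, so the table is complete.  Runs in O(log(x)^2)."""
--     if x <= 0:
--         return []
--     q, r = divmod(x, 10)
--     sub = _counts_below(q)
--     dq = _digit_sum(q)
--     return [sum(sub[t - e] for e in range(10) if 0 <= t - e < len(sub))
--             + (1 if dq <= t < dq + r else 0)
--             for t in range(len(sub) + 9)]
--
--
-- def group_distribution_v2(n_customers: int,
--                           n_first_id: int = 0,
--                           ) -> list:
--     lo = n_first_id
--     hi = n_first_id + n_customers
--     chi = _counts_below(hi)
--     clo = _counts_below(lo)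
--     cnt = [chi[s] - (clo[s] if s < len(clo) else 0) for s in range(len(chi))]
--     npos = min(hi, 0) - lo          # ids < 0 in the range all have digit sum 0
--     if npos > 0:
--         if not cnt:
--             cnt = [0]
--         cnt[0] += npos
--     m = -1
--     for s, c in enumerate(cnt):
--         if c != 0:
--             m = s
--     return cnt[:m + 1]
-- ===== Notes on version B (the rewrite author's own statement) =====
-- stated objective: faster
-- what changed: A tallies the digit sum of every id in the range into an array (O(N log N)); B computes, by a digit-DP recursion on x//10, the table of counts of each digit sum below a bound, takes the difference of the tables for the two range endpoints (plus the nonpositive ids, which all have digit sum 0), and trims trailing zeros, in O(log^2 N).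
import Mathlib
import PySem

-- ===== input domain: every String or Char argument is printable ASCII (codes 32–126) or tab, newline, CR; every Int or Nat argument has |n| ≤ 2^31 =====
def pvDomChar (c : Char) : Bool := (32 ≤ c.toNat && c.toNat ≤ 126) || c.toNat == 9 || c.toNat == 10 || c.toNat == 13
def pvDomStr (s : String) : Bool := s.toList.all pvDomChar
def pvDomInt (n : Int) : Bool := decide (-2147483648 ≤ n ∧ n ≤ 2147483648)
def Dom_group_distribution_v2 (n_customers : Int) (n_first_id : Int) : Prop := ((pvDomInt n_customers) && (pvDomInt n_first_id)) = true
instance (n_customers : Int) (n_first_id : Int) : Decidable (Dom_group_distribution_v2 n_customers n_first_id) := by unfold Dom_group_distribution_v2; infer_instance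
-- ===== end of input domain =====

-- B replaces A's per-id tally over the whole range by a digit-DP table of
-- counts-below; measured faster on large ranges in a timing run.

-- ===== PORT A =====

-- helper needed by the port's own termination proof
theorem pvFloordiv10_lt (id : Int) (h : 0 < id) :
    (PySem.Int.floordiv id 10).toNat < id.toNat := by
  rw [PySem.Int.floordiv_eq_ediv_of_pos (by omega)]
  omega

-- A's _id_to_group_encode_v2: 'while _id > 0: res += _id % 10; _id = _id // 10'
def pvEncLoop (id res : Int) : Int :=
  if h : 0 < id then pvEncLoop (PySem.Int.floordiv id 10) (res + PySem.Int.mod id 10)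
  else res
termination_by id.toNat
decreasing_by exact pvFloordiv10_lt id h

-- A's 'while ans[-1] == 0: ans.pop()' (an empty ans would raise; excluded by Pre_)
def pvPopTrail (l : List Int) : List Int :=
  if h : l = [] then l
  else if PySem.List.pyGetD l (-1) 0 = 0 then pvPopTrail l.dropLast
  else l
termination_by l.length
decreasing_by
  have := List.length_pos_of_ne_nil h
  simp [List.length_dropLast]; omega

def group_distribution_v2 (n_customers : Int) (n_first_id : Int) : List Int :=
  let ans := PySem.List.pyRepeat [(0 : Int)] (((PySem.Int.toChars n_customers).length : Int) * 9 + 1)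
  let ans2 := ((PySem.List.pyRange n_first_id (n_customers + n_first_id) 1).map
      (fun id => pvEncLoop id 0)).foldl
    (fun a i => PySem.List.pySetD a i (PySem.List.pyGetD a i 0 + 1)) ans
  pvPopTrail ans2

-- ===== PORT B =====

-- Source B's _digit_sum (loop with accumulator s)
def pvDigitSumLoop (n s : Int) : Int :=
  if h : 0 < n then pvDigitSumLoop (PySem.Int.floordiv n 10) (s + PySem.Int.mod n 10)
  else s
termination_by n.toNat
decreasing_by exact pvFloordiv10_lt n h

def pvDigitSum (n : Int) : Int := pvDigitSumLoop n 0

-- Source B's _counts_below: digit DP, table of counts of each digit sum below x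
def pvCountsBelow (x : Int) : List Int :=
  if h : x ≤ 0 then []
  else
    let q := PySem.Int.floordiv x 10
    let r := PySem.Int.mod x 10
    let sub := pvCountsBelow q
    let dq := pvDigitSum q
    (PySem.List.pyRange 0 ((sub.length : Int) + 9) 1).map (fun t =>
      ((PySem.List.pyRange 0 10 1).map (fun e =>
          if 0 ≤ t - e ∧ t - e < (sub.length : Int) then PySem.List.pyGetD sub (t - e) 0
          else 0)).sum
      + (if dq ≤ t ∧ t < dq + r then 1 else 0))
termination_by x.toNat
decreasing_by exact pvFloordiv10_lt x (by omega)

def group_distribution_v2_alt (n_customers : Int) (n_first_id : Int) : List Int :=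
  let lo := n_first_id
  let hi := n_first_id + n_customers
  let chi := pvCountsBelow hi
  let clo := pvCountsBelow lo
  let cnt := (PySem.List.pyRange 0 (chi.length : Int) 1).map (fun s =>
      PySem.List.pyGetD chi s 0 -
        (if s < (clo.length : Int) then PySem.List.pyGetD clo s 0 else 0))
  let npos := min hi 0 - lo
  let cnt2 := if 0 < npos then
      (let cnt1 := if cnt = [] then [(0 : Int)] else cnt
       PySem.List.pySetD cnt1 0 (PySem.List.pyGetD cnt1 0 0 + npos))
    else cnt
  let m := (PySem.List.enumerate cnt2 0).foldl
    (fun m p => if p.2 ≠ 0 then p.1 else m) (-1)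
  PySem.List.slice cnt2 none (some (m + 1))

-- ===== PRECONDITION & SPEC =====

-- closed-form decimal digit sum of a nonnegative integer below 10^11 (covers all of Dom_)
def pvDigits11 (m : Int) : Int :=
  m % 10 + m / 10 % 10 + m / 10 / 10 % 10 + m / 10 / 10 / 10 % 10 +
  m / 10 / 10 / 10 / 10 % 10 + m / 10 / 10 / 10 / 10 / 10 % 10 +
  m / 10 / 10 / 10 / 10 / 10 / 10 % 10 + m / 10 / 10 / 10 / 10 / 10 / 10 / 10 % 10 +
  m / 10 / 10 / 10 / 10 / 10 / 10 / 10 / 10 % 10 +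
  m / 10 / 10 / 10 / 10 / 10 / 10 / 10 / 10 / 10 % 10 +
  m / 10 / 10 / 10 / 10 / 10 / 10 / 10 / 10 / 10 / 10 % 10

-- candidate j of n: n itself (j = 0), or n rounded down at decimal position j with
-- trailing nines (j ≥ 1); these attain the maximal digit sum over any range ending at n
def pvCand (n : Int) (j : Nat) : Int := if j = 0 then n else n / 10 ^ j * 10 ^ j - 1

-- Pre_ excludes exactly the inputs on which A raises IndexError: n_customers ≤ 0 (the
-- trailing-zero pop loop empties ans and ans[-1] fails), or some id in the range has
-- digit sum above 9*len(str(n_customers)) so ans[i] is out of range — the latter holds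
-- iff one of the ≤ 11 candidates of the last id that lies in the range overflows.
def Pre_group_distribution_v2 (n_customers : Int) (n_first_id : Int) : Prop :=
  1 ≤ n_customers ∧
    ∀ j ∈ List.range 11,
      pvCand (n_first_id + n_customers - 1) j ≤ 0 ∨
        pvCand (n_first_id + n_customers - 1) j < n_first_id ∨
          pvDigits11 (pvCand (n_first_id + n_customers - 1) j)
            ≤ 9 * ((PySem.Int.toChars n_customers).length : Int)
instance (n_customers : Int) (n_first_id : Int) : Decidable (Pre_group_distribution_v2 n_customers n_first_id) := by unfold Pre_group_distribution_v2; infer_instance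

def pvWitness_group_distribution_v2 : Int × Int := (10, 0)

def Spec_group_distribution_v2 (n_customers : Int) (n_first_id : Int) (out : List Int) : Prop := out = group_distribution_v2_alt n_customers n_first_id
instance (n_customers : Int) (n_first_id : Int) (out : List Int) : Decidable (Spec_group_distribution_v2 n_customers n_first_id out) := by unfold Spec_group_distribution_v2; infer_instance

-- ===== CLAIM (what is proved, stated in full; the proofs are below) =====
def Claim_equal_group_distribution_v2 : Prop := ∀ (n_customers : Int) (n_first_id : Int), Dom_group_distribution_v2 n_customers n_first_id → Pre_group_distribution_v2 n_customers n_first_id → Spec_group_distribution_v2 n_customers n_first_id (group_distribution_v2 n_customers n_first_id)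

-- ===== LEMMAS AND PROOFS =====

-- count (as an Int) of ids in [lo, hi) whose digit sum is t
def pvCnt (lo hi t : Int) : Int :=
  ((PySem.List.pyRange lo hi 1).countP (fun n => pvDigitSum n == t) : Int)

-- the canonical table of counts and the canonical trailing-zero trim
def pvTab (f : Nat → Int) (N : Nat) : List Int := (List.range N).map f

def pvRdw (l : List Int) : List Int := (l.reverse.dropWhile (fun c => c == 0)).reverse

theorem pvDigitSumLoop_shift (n s t : Int) :
    pvDigitSumLoop n (s + t) = s + pvDigitSumLoop n t := by
  conv_lhs => rw [pvDigitSumLoop]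
  conv_rhs => rw [pvDigitSumLoop]
  by_cases h : 0 < n
  · simp only [dif_pos h]
    rw [add_assoc]
    exact pvDigitSumLoop_shift (PySem.Int.floordiv n 10) s (t + PySem.Int.mod n 10)
  · simp only [dif_neg h]
termination_by n.toNat
decreasing_by exact pvFloordiv10_lt n h

theorem pvEncLoop_eq_loop (id res : Int) : pvEncLoop id res = pvDigitSumLoop id res := by
  rw [pvEncLoop, pvDigitSumLoop]
  split
  · exact pvEncLoop_eq_loop _ _
  · rfl
termination_by id.toNat
decreasing_by exact pvFloordiv10_lt id (by assumption)

theorem pvEncLoop_eq (id res : Int) : pvEncLoop id res = res + pvDigitSum id := by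
  rw [pvEncLoop_eq_loop, pvDigitSum, ← pvDigitSumLoop_shift, add_zero]

theorem pvDigitSum_nonpos {n : Int} (h : n ≤ 0) : pvDigitSum n = 0 := by
  rw [pvDigitSum, pvDigitSumLoop]
  simp [show ¬ 0 < n by omega]

theorem pvDigitSum_step {n : Int} (h : 0 < n) :
    pvDigitSum n = PySem.Int.mod n 10 + pvDigitSum (PySem.Int.floordiv n 10) := by
  have hs := pvDigitSumLoop_shift (PySem.Int.floordiv n 10) (PySem.Int.mod n 10) 0
  rw [add_zero] at hs
  rw [pvDigitSum, pvDigitSumLoop, dif_pos h, zero_add, hs, pvDigitSum]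

theorem pvDigitSum_nonneg (n : Int) : 0 ≤ pvDigitSum n := by
  by_cases h : 0 < n
  · rw [pvDigitSum_step h]
    have h1 := pvDigitSum_nonneg (PySem.Int.floordiv n 10)
    have h2 := PySem.Int.mod_nonneg n (b := 10) (by omega)
    omega
  · rw [pvDigitSum_nonpos (by omega)]
termination_by n.toNat
decreasing_by exact pvFloordiv10_lt n (by assumption)

theorem pvDigitSum_decomp (m e : Int) (hm : 0 ≤ m) (he0 : 0 ≤ e) (he : e < 10) :
    pvDigitSum (10 * m + e) = pvDigitSum m + e := by
  by_cases h : 0 < 10 * m + e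
  · rw [pvDigitSum_step h]
    have hmod : PySem.Int.mod (10 * m + e) 10 = e := by
      rw [PySem.Int.mod_eq_emod_of_pos (by omega)]
      omega
    have hdiv : PySem.Int.floordiv (10 * m + e) 10 = m := by
      rw [PySem.Int.floordiv_eq_ediv_of_pos (by omega)]
      omega
    rw [hmod, hdiv]; omega
  · have hm0 : m = 0 ∧ e = 0 := by constructor <;> omega
    rw [hm0.1, hm0.2]
    simp [pvDigitSum_nonpos]

theorem pvDigitSum_le (d : Nat) : ∀ n : Int, 0 ≤ n → n < (10 : Int) ^ d →
    pvDigitSum n ≤ 9 * d := by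
  induction d with
  | zero =>
    intro n h0 h1
    simp only [pow_zero] at h1
    rw [pvDigitSum_nonpos (by omega)]
    simp
  | succ d ih =>
    intro n h0 h1
    by_cases h : 0 < n
    · rw [pvDigitSum_step h]
      have hq0 : 0 ≤ PySem.Int.floordiv n 10 := by
        rw [PySem.Int.floordiv_eq_ediv_of_pos (by omega)]; omega
      have hqn : 10 * PySem.Int.floordiv n 10 ≤ n := by
        rw [PySem.Int.floordiv_eq_ediv_of_pos (by omega)]; omega
      have hpow : (10 : Int) ^ (d + 1) = 10 * 10 ^ d := by ring
      have hq : PySem.Int.floordiv n 10 < (10 : Int) ^ d := by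
        rw [hpow] at h1; omega
      have := ih (PySem.Int.floordiv n 10) hq0 hq
      have hm : PySem.Int.mod n 10 < 10 := PySem.Int.mod_lt n (by omega)
      omega
    · rw [pvDigitSum_nonpos (by omega)]
      positivity

-- the digit-sum recursion in terms of Lean's ediv/emod (positive argument)
theorem pvDS_step10 (n : Int) (h : 0 < n) :
    pvDigitSum n = n % 10 + pvDigitSum (n / 10) := by
  rw [pvDigitSum_step h, PySem.Int.mod_eq_emod_of_pos (by omega),
    PySem.Int.floordiv_eq_ediv_of_pos (by omega)]

-- digit sums are additive across a split at decimal position k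
theorem pvDS_split : ∀ (k : Nat) (a b : Int), 0 ≤ a → 0 ≤ b → b < 10 ^ k →
    pvDigitSum (a * 10 ^ k + b) = pvDigitSum a + pvDigitSum b := by
  intro k
  induction k with
  | zero =>
    intro a b _ h1 h2
    simp only [pow_zero] at h2 ⊢
    have hb : b = 0 := by omega
    subst hb
    simp [pvDigitSum_nonpos le_rfl]
  | succ k ih =>
    intro a b h0 h1 h2
    have hP : (0:Int) < 10 ^ k := by positivity
    have hpow : (10:Int) ^ (k+1) = 10 * 10 ^ k := by ring
    have hb1 : 0 ≤ b / 10 := by omega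
    have hbe0 : 0 ≤ b % 10 := by omega
    have hbe9 : b % 10 < 10 := by omega
    have hbdec : 10 * (b / 10) + b % 10 = b := by omega
    have hblt : b / 10 < 10 ^ k := by omega
    have h10 : a * 10 ^ (k+1) + b = 10 * (a * 10 ^ k + b / 10) + b % 10 := by
      rw [hpow]; linear_combination -hbdec
    have hank : 0 ≤ a * 10 ^ k + b / 10 := by
      have := mul_nonneg h0 (le_of_lt hP); omega
    rw [h10, pvDigitSum_decomp _ _ hank hbe0 hbe9, ih a (b/10) h0 hb1 hblt]
    have hdsb : pvDigitSum b = pvDigitSum (b/10) + b % 10 := by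
      have hd := pvDigitSum_decomp (b/10) (b%10) hb1 hbe0 hbe9
      rw [hbdec] at hd
      exact hd
    omega

theorem pvDS_nines : ∀ k : Nat, pvDigitSum (10 ^ k - 1) = 9 * k := by
  intro k
  induction k with
  | zero => simp [pvDigitSum_nonpos le_rfl]
  | succ k ih =>
    have hP : (0:Int) < 10 ^ k := by positivity
    have h : (10:Int) ^ (k+1) - 1 = 10 * (10 ^ k - 1) + 9 := by ring
    rw [h, pvDigitSum_decomp _ _ (by omega) (by omega) (by omega), ih]
    push_cast; ring

-- a below q with the same tens prefix has digit sum ≤ that of q−1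
theorem pvDS_digit_mono (a q : Int) (h0 : 0 ≤ a) (hlt : a < q) (hdiv : a / 10 = q / 10) :
    pvDigitSum a ≤ pvDigitSum (q - 1) := by
  have hq10 : a % 10 < q % 10 := by omega
  by_cases ha : 0 < a
  · have hq2 : 1 < q := by omega
    have hqm1 : (q-1) % 10 = q % 10 - 1 := by omega
    have hqd1 : (q-1) / 10 = q / 10 := by omega
    rw [pvDS_step10 a ha, pvDS_step10 (q-1) (by omega), hqm1, hqd1, hdiv]
    omega
  · have haz : a = 0 := by omega
    subst haz
    rw [pvDigitSum_nonpos le_rfl]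
    exact pvDigitSum_nonneg _

theorem pvEdivEdiv (x : Int) (k : Nat) (hx : 0 ≤ x) :
    x / 10 ^ k / 10 = x / 10 ^ (k+1) := by
  rw [Int.ediv_ediv_of_nonneg (by positivity : (0:Int) ≤ 10 ^ k), ← pow_succ]

-- the closed-form digit sum agrees with the loop digit sum below 10^11
set_option maxHeartbeats 1000000 in
theorem pvDigits11_eq (m : Int) (h0 : 0 ≤ m) (h1 : m < 100000000000) :
    pvDigits11 m = pvDigitSum m := by
  have hs : ∀ x : Int, 0 ≤ x → pvDigitSum x = x % 10 + pvDigitSum (x / 10) := by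
    intro x hx
    rcases eq_or_lt_of_le hx with h | h
    · rw [← h, pvDigitSum_nonpos (le_refl (0:Int)),
        show (0:Int) % 10 = 0 by norm_num, show (0:Int) / 10 = 0 by norm_num,
        pvDigitSum_nonpos (le_refl (0:Int))]
      norm_num
    · exact pvDS_step10 x h
  have e0 := hs m h0
  have e1 := hs (m / 10) (by omega)
  have e2 := hs (m / 10 / 10) (by omega)
  have e3 := hs (m / 10 / 10 / 10) (by omega)
  have e4 := hs (m / 10 / 10 / 10 / 10) (by omega)
  have e5 := hs (m / 10 / 10 / 10 / 10 / 10) (by omega)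
  have e6 := hs (m / 10 / 10 / 10 / 10 / 10 / 10) (by omega)
  have e7 := hs (m / 10 / 10 / 10 / 10 / 10 / 10 / 10) (by omega)
  have e8 := hs (m / 10 / 10 / 10 / 10 / 10 / 10 / 10 / 10) (by omega)
  have e9 := hs (m / 10 / 10 / 10 / 10 / 10 / 10 / 10 / 10 / 10) (by omega)
  have e10 := hs (m / 10 / 10 / 10 / 10 / 10 / 10 / 10 / 10 / 10 / 10) (by omega)
  have ez : m / 10 / 10 / 10 / 10 / 10 / 10 / 10 / 10 / 10 / 10 / 10 = 0 := by omega
  rw [e0, e1, e2, e3, e4, e5, e6, e7, e8, e9, e10, ez,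
    pvDigitSum_nonpos (le_refl (0:Int))]
  unfold pvDigits11
  ring

-- the candidate bound: if every candidate of n that lies above lo has digit sum ≤ T,
-- then every x in [lo, n] with the same 10^k-prefix as n has digit sum ≤ T
theorem pvDS_bound_cands : ∀ (k : Nat) (x n lo T : Int), lo ≤ x → x ≤ n → 0 ≤ x →
    (∀ j ∈ List.range (k+1), pvCand n j < lo ∨ pvDigitSum (pvCand n j) ≤ T) →
    x / 10 ^ k = n / 10 ^ k → pvDigitSum x ≤ T := by
  intro k
  induction k with
  | zero =>
    intro x n lo T hlo hxn hx0 hc hdiv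
    simp only [pow_zero, Int.ediv_one] at hdiv
    subst hdiv
    have hcx : pvCand x 0 = x := by simp [pvCand]
    rcases hc 0 (by simp) with h | h
    · omega
    · rw [hcx] at h; exact h
  | succ k ih =>
    intro x n lo T hlo hxn hx0 hc hdiv
    have hn0 : 0 ≤ n := le_trans hx0 hxn
    by_cases heq : x / 10 ^ k = n / 10 ^ k
    · exact ih x n lo T hlo hxn hx0
        (fun j hj => hc j (by simp only [List.mem_range] at hj ⊢; omega)) heq
    · have hP : (0:Int) < 10 ^ k := by positivity
      have ha0 : 0 ≤ x / 10 ^ k := Int.ediv_nonneg hx0 (le_of_lt hP)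
      have haq : x / 10 ^ k ≤ n / 10 ^ k := Int.ediv_le_ediv hP hxn
      have halt : x / 10 ^ k < n / 10 ^ k := lt_of_le_of_ne haq heq
      have hdd : x / 10 ^ k / 10 = n / 10 ^ k / 10 := by
        rw [pvEdivEdiv x k hx0, pvEdivEdiv n k hn0]; exact hdiv
      by_cases hk0 : k = 0
      · subst hk0
        simp only [pow_zero, Int.ediv_one] at ha0 haq halt hdd
        have hcn : pvCand n 0 = n := by simp [pvCand]
        have hTn : pvDigitSum n ≤ T := by
          rcases hc 0 (by simp) with h | h
          · omega
          · rw [hcn] at h; exact h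
        by_cases hx : 0 < x
        · rw [pvDS_step10 x hx] at *
          rw [pvDS_step10 n (by omega)] at hTn
          rw [hdd]
          omega
        · rw [pvDigitSum_nonpos (by omega)]
          have := pvDigitSum_nonneg n
          omega
      · -- k ≥ 1: compare with candidate j = k
        set a := x / 10 ^ k with hadef
        set q := n / 10 ^ k with hqdef
        have hcandk : pvCand n k = q * 10 ^ k - 1 := by
          simp [pvCand, hk0, hqdef]
        have hprod : (a + 1) * 10 ^ k ≤ q * 10 ^ k :=
          mul_le_mul_of_nonneg_right (by omega) (le_of_lt hP)
        have hprodeq : (a + 1) * 10 ^ k = a * 10 ^ k + 10 ^ k := by ring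
        have hxdec : 10 ^ k * a + x % 10 ^ k = x := Int.ediv_add_emod x (10 ^ k)
        have hr0 : 0 ≤ x % 10 ^ k := Int.emod_nonneg x (ne_of_gt hP)
        have hr9 : x % 10 ^ k < 10 ^ k := Int.emod_lt_of_pos x hP
        have hxm : x ≤ q * 10 ^ k - 1 := by nlinarith
        have hdsm : pvDigitSum (q * 10 ^ k - 1) ≤ T := by
          rcases hc k (by simp only [List.mem_range]; omega) with h | h
          · rw [hcandk] at h; omega
          · rwa [hcandk] at h
        have hxsplit : pvDigitSum x = pvDigitSum a + pvDigitSum (x % 10 ^ k) := by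
          have hs := pvDS_split k a (x % 10 ^ k) ha0 hr0 hr9
          rw [show a * 10 ^ k + x % 10 ^ k = x by linear_combination hxdec] at hs
          exact hs
        have hrle : pvDigitSum (x % 10 ^ k) ≤ 9 * k := pvDigitSum_le k _ hr0 hr9
        have hmsplit : pvDigitSum (q * 10 ^ k - 1) = pvDigitSum (q - 1) + 9 * k := by
          have h1 : q * 10 ^ k - 1 = (q - 1) * 10 ^ k + (10 ^ k - 1) := by ring
          rw [h1, pvDS_split k (q-1) (10 ^ k - 1) (by omega) (by omega) (by omega),
            pvDS_nines k]
        have hmono := pvDS_digit_mono a q ha0 halt hdd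
        omega

-- within Pre_ (and Dom_), every id of the range fits A's table
theorem pvPre_ds_all (nc nf : Int) (hdom : Dom_group_distribution_v2 nc nf)
    (hpre : Pre_group_distribution_v2 nc nf) :
    ∀ id : Int, nf ≤ id → id < nf + nc →
      pvDigitSum id ≤ 9 * ((PySem.Int.toChars nc).length : Int) := by
  obtain ⟨hnc, hc⟩ := hpre
  intro id h1 h2
  by_cases hid : id ≤ 0
  · rw [pvDigitSum_nonpos hid]
    positivity
  · simp only [Dom_group_distribution_v2, pvDomInt, Bool.and_eq_true,
      decide_eq_true_eq] at hdom
    have hbig : ((10:Int) ^ (10:Nat)) = 10000000000 := by norm_num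
    have hb11 : ((10:Int) ^ (11:Nat)) = 100000000000 := by norm_num
    have hlt10 : id < (10:Int) ^ (10:Nat) := by omega
    have hnlt : nf + nc - 1 < (10:Int) ^ (10:Nat) := by omega
    have hcand_le : ∀ j : Nat, pvCand (nf + nc - 1) j ≤ nf + nc - 1 := by
      intro j
      unfold pvCand
      split
      · exact le_refl _
      · have h2 : (nf + nc - 1) / 10 ^ j * 10 ^ j ≤ nf + nc - 1 :=
          Int.ediv_mul_le _ (by positivity)
        omega
    have hc' : ∀ j ∈ List.range 11,
        pvCand (nf + nc - 1) j < nf ∨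
          pvDigitSum (pvCand (nf + nc - 1) j)
            ≤ 9 * ((PySem.Int.toChars nc).length : Int) := by
      intro j hj
      rcases hc j hj with h | h | h
      · refine Or.inr ?_
        rw [pvDigitSum_nonpos h]
        positivity
      · exact Or.inl h
      · by_cases hpos : pvCand (nf + nc - 1) j ≤ 0
        · refine Or.inr ?_
          rw [pvDigitSum_nonpos hpos]
          positivity
        · refine Or.inr ?_
          rw [← pvDigits11_eq _ (by omega) (by have := hcand_le j; omega)]
          exact h
    apply pvDS_bound_cands 10 id (nf + nc - 1) nf _ (by omega) (by omega) (by omega) hc'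
    rw [Int.ediv_eq_zero_of_lt (by omega) hlt10,
      Int.ediv_eq_zero_of_lt (by omega) hnlt]

-- range split for counts
theorem pvCnt_split (lo m hi t : Int) (h1 : lo ≤ m) (h2 : m ≤ hi) :
    pvCnt lo hi t = pvCnt lo m t + pvCnt m hi t := by
  unfold pvCnt
  rw [PySem.List.pyRange_one_append lo m hi h1 h2, List.countP_append]
  push_cast
  ring

-- counting a value in a nodup list of candidates
theorem pvSum_indicator (l : List Int) (hn : l.Nodup) (v : Int) :
    (l.map (fun e => if v = e then (1 : Int) else 0)).sum = if v ∈ l then 1 else 0 := by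
  induction l with
  | nil => simp
  | cons a l ih =>
    rw [List.nodup_cons] at hn
    by_cases hva : v = a
    · subst hva
      simp [hn.1, ih hn.2]
    · simp only [List.map_cons, List.sum_cons, if_neg hva, ih hn.2, zero_add,
        List.mem_cons]
      by_cases hm : v ∈ l <;> simp [hm, hva]

-- an empty range has zero counts
theorem pvCnt_nil (lo hi t : Int) (h : hi ≤ lo) : pvCnt lo hi t = 0 := by
  unfold pvCnt
  rw [PySem.List.pyRange_one_eq_nil h]
  simp

-- count over one block [10q, 10q+r)
theorem pvCnt_block (q r t : Int) (hq : 0 ≤ q) (hr0 : 0 ≤ r) (hr : r ≤ 10) :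
    pvCnt (10 * q) (10 * q + r) t =
      if pvDigitSum q ≤ t ∧ t < pvDigitSum q + r then 1 else 0 := by
  unfold pvCnt
  have hcong : (PySem.List.pyRange (10 * q) (10 * q + r) 1).countP
        (fun n => pvDigitSum n == t)
      = (PySem.List.pyRange (10 * q) (10 * q + r) 1).countP
        (fun n => n == t - pvDigitSum q + 10 * q) := by
    apply List.countP_congr
    intro n hn
    rw [PySem.List.mem_pyRange_one] at hn
    have hds : pvDigitSum n = pvDigitSum q + (n - 10 * q) := by
      have h2 := pvDigitSum_decomp q (n - 10 * q) hq (by omega) (by omega)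
      rw [show 10 * q + (n - 10 * q) = n by ring] at h2
      exact h2
    simp only [beq_iff_eq]
    omega
  rw [hcong]
  have hnd := PySem.List.nodup_pyRange_one (a := 10 * q) (b := 10 * q + r)
  by_cases hmem : t - pvDigitSum q + 10 * q ∈ PySem.List.pyRange (10 * q) (10 * q + r) 1
  · rw [show ((PySem.List.pyRange (10 * q) (10 * q + r) 1).countP
        (fun n => n == t - pvDigitSum q + 10 * q))
        = (PySem.List.pyRange (10 * q) (10 * q + r) 1).count (t - pvDigitSum q + 10 * q)
        from rfl,
      List.count_eq_one_of_mem hnd hmem]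
    rw [PySem.List.mem_pyRange_one] at hmem
    rw [if_pos (by omega)]
    norm_num
  · rw [show ((PySem.List.pyRange (10 * q) (10 * q + r) 1).countP
        (fun n => n == t - pvDigitSum q + 10 * q))
        = (PySem.List.pyRange (10 * q) (10 * q + r) 1).count (t - pvDigitSum q + 10 * q)
        from rfl,
      List.count_eq_zero_of_not_mem hmem]
    rw [PySem.List.mem_pyRange_one] at hmem
    rw [if_neg (by omega)]
    norm_num

-- convolution step: counts below 10q distribute over the last digit
theorem pvCnt_tenmul (q : Int) (hq : 0 ≤ q) (t : Int) :
    pvCnt 0 (10 * q) t =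
      ((PySem.List.pyRange 0 10 1).map (fun e => pvCnt 0 q (t - e))).sum := by
  by_cases hq0 : q ≤ 0
  · have : q = 0 := by omega
    subst this
    have hz0 : ∀ u : Int, pvCnt 0 0 u = 0 := fun u => pvCnt_nil _ _ _ (by omega)
    simp [hz0]
  · -- 0 < q : peel the top block [10(q-1), 10q)
    have hq1 : 0 ≤ q - 1 := by omega
    have hsingle : ∀ u : Int, pvCnt (q - 1) q u
        = if pvDigitSum (q - 1) = u then 1 else 0 := by
      intro u
      unfold pvCnt
      have hs := PySem.List.pyRange_one_singleton (a := q - 1)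
      rw [sub_add_cancel] at hs
      rw [hs]
      by_cases h : pvDigitSum (q - 1) = u <;> simp [h]
    have hsplitL : pvCnt 0 (10 * q) t
        = pvCnt 0 (10 * (q - 1)) t + pvCnt (10 * (q - 1)) (10 * q) t :=
      pvCnt_split _ _ _ _ (by omega) (by omega)
    have hblock : pvCnt (10 * (q - 1)) (10 * q) t
        = if pvDigitSum (q - 1) ≤ t ∧ t < pvDigitSum (q - 1) + 10 then 1 else 0 := by
      rw [show 10 * q = 10 * (q - 1) + 10 by ring]
      exact pvCnt_block (q - 1) 10 t hq1 (by omega) (by omega)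
    have hIH := pvCnt_tenmul (q - 1) hq1 t
    have hsplitR : ((PySem.List.pyRange 0 10 1).map (fun e => pvCnt 0 q (t - e)))
        = ((PySem.List.pyRange 0 10 1).map
            (fun e => pvCnt 0 (q - 1) (t - e) + (if t - pvDigitSum (q - 1) = e then 1 else 0))) := by
      apply List.map_congr_left
      intro e he
      rw [pvCnt_split 0 (q - 1) q (t - e) (by omega) (by omega), hsingle (t - e)]
      congr 1
      split_ifs with h1 h2 h2 <;> first | rfl | omega
    rw [hsplitL, hblock, hIH, hsplitR, PySem.List.sum_map_add_int,
      pvSum_indicator _ (PySem.List.nodup_pyRange_one _ _)]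
    have hmem := PySem.List.mem_pyRange_one (x := t - pvDigitSum (q - 1)) (a := (0:Int)) (b := 10)
    by_cases hm : t - pvDigitSum (q - 1) ∈ PySem.List.pyRange (0:Int) 10 1
    · rw [if_pos hm, if_pos (by rw [hmem] at hm; omega)]
    · rw [if_neg hm, if_neg (by rw [hmem] at hm; omega)]
termination_by q.toNat
decreasing_by omega

-- digit sums below x are below the table length (needed for table completeness)
theorem pvCountsBelow_len (x : Int) (h : 0 < x) :
    (pvCountsBelow x).length = (pvCountsBelow (PySem.Int.floordiv x 10)).length + 9 := by
  rw [pvCountsBelow]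
  simp only [show ¬ x ≤ 0 by omega, dite_false]
  rw [List.length_map, PySem.List.length_pyRange_one]
  omega

theorem pvDS_le_len (x : Int) : pvDigitSum x ≤ ((pvCountsBelow x).length : Int) := by
  by_cases h : 0 < x
  · rw [pvCountsBelow_len x h, pvDigitSum_step h]
    have := pvDS_le_len (PySem.Int.floordiv x 10)
    have hm : PySem.Int.mod x 10 < 10 := PySem.Int.mod_lt x (by omega)
    push_cast
    omega
  · rw [pvDigitSum_nonpos (by omega)]
    positivity
termination_by x.toNat
decreasing_by exact pvFloordiv10_lt x (by assumption)

theorem pvDS_lt_len (x : Int) : ∀ n : Int, 0 ≤ n → n < x →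
    pvDigitSum n < ((pvCountsBelow x).length : Int) := by
  intro n h0 h1
  have hx : 0 < x := by omega
  rw [pvCountsBelow_len x hx]
  set q := PySem.Int.floordiv x 10 with hqdef
  set r := PySem.Int.mod x 10 with hrdef
  have hx10 : q * 10 + r = x := PySem.Int.floordiv_mul_add_mod x 10
  have hr0 : 0 ≤ r := PySem.Int.mod_nonneg x (by omega)
  have hr10 : r < 10 := PySem.Int.mod_lt x (by omega)
  set m := PySem.Int.floordiv n 10 with hmdef
  set e := PySem.Int.mod n 10 with hedef
  have hn10 : m * 10 + e = n := PySem.Int.floordiv_mul_add_mod n 10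
  have he0 : 0 ≤ e := PySem.Int.mod_nonneg n (by omega)
  have he10 : e < 10 := PySem.Int.mod_lt n (by omega)
  have hm0 : 0 ≤ m := by
    rw [hmdef, PySem.Int.floordiv_eq_ediv_of_pos (by omega)]; omega
  have hds : pvDigitSum n = pvDigitSum m + e := by
    rw [show n = 10 * m + e by omega]
    exact pvDigitSum_decomp m e hm0 he0 he10
  rcases lt_or_ge m q with hlt | hge
  · have := pvDS_lt_len q m hm0 hlt
    push_cast
    omega
  · have hmq : m = q := by omega
    have her : e < r := by omega
    have := pvDS_le_len q
    rw [hds, hmq]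
    push_cast
    omega
termination_by x.toNat
decreasing_by exact pvFloordiv10_lt x (by omega)

-- the DP table is exactly the counts below x (all indices, in and out of range)
theorem pvCountsBelow_getD (x : Int) (t : Nat) :
    (pvCountsBelow x).getD t 0 = pvCnt 0 x (t : Int) := by
  by_cases hx : x ≤ 0
  · rw [pvCountsBelow]
    simp only [dif_pos hx]
    rw [pvCnt_nil 0 x _ hx]
    simp
  · have hx0 : 0 < x := by omega
    have hq0 : 0 ≤ PySem.Int.floordiv x 10 := by
      rw [PySem.Int.floordiv_eq_ediv_of_pos (by omega)]; omega
    have hqx : (PySem.Int.floordiv x 10).toNat < x.toNat := pvFloordiv10_lt x hx0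
    have hxeq : PySem.Int.floordiv x 10 * 10 + PySem.Int.mod x 10 = x :=
      PySem.Int.floordiv_mul_add_mod x 10
    have hr0 : 0 ≤ PySem.Int.mod x 10 := PySem.Int.mod_nonneg x (by omega)
    have hr10 : PySem.Int.mod x 10 < 10 := PySem.Int.mod_lt x (by omega)
    conv_lhs => rw [pvCountsBelow]
    simp only [dif_neg hx]
    set q := PySem.Int.floordiv x 10 with hqdef
    set r := PySem.Int.mod x 10 with hrdef
    set sub := pvCountsBelow q with hsubdef
    have hlen : ((PySem.List.pyRange 0 ((sub.length : Int) + 9) 1).map (fun t =>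
        ((PySem.List.pyRange 0 10 1).map (fun e =>
            if 0 ≤ t - e ∧ t - e < (sub.length : Int) then PySem.List.pyGetD sub (t - e) 0
            else 0)).sum
        + (if pvDigitSum q ≤ t ∧ t < pvDigitSum q + r then 1 else 0))).length
        = sub.length + 9 := by
      rw [List.length_map, PySem.List.length_pyRange_one]
      omega
    by_cases ht : t < sub.length + 9
    · rw [List.getD_eq_getElem _ _ (by rw [hlen]; omega)]
      rw [List.getElem_map, PySem.List.getElem_pyRange_one, zero_add]
      have hinner : ((PySem.List.pyRange 0 10 1).map (fun e =>
            if 0 ≤ (t : Int) - e ∧ (t : Int) - e < (sub.length : Int)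
            then PySem.List.pyGetD sub ((t : Int) - e) 0 else 0))
          = ((PySem.List.pyRange 0 10 1).map (fun e => pvCnt 0 q ((t : Int) - e))) := by
        apply List.map_congr_left
        intro e he
        rw [PySem.List.mem_pyRange_one] at he
        by_cases hg : 0 ≤ (t : Int) - e ∧ (t : Int) - e < (sub.length : Int)
        · rw [if_pos hg, PySem.List.pyGetD_eq_getElem _ _ hg.1 (by exact_mod_cast hg.2),
            ← List.getD_eq_getElem _ 0 (by omega)]
          rw [hsubdef]
          rw [pvCountsBelow_getD q (((t : Int) - e).toNat)]
          congr 1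
          omega
        · rw [if_neg hg]
          symm
          unfold pvCnt
          rw [Nat.cast_eq_zero, List.countP_eq_zero]
          intro n hn
          rw [PySem.List.mem_pyRange_one] at hn
          simp only [beq_iff_eq]
          rcases not_and_or.mp hg with hneg | hbig
          · have := pvDigitSum_nonneg n
            omega
          · have := pvDS_lt_len q n hn.1 hn.2
            rw [← hsubdef] at this
            omega
      rw [hinner, ← pvCnt_tenmul q hq0,
        ← pvCnt_block q r (t : Int) hq0 (by omega) (by omega),
        ← pvCnt_split 0 (10 * q) (10 * q + r) (t : Int) (by omega) (by omega),
        show 10 * q + r = x by omega]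
    · rw [List.getD_eq_default _ _ (by rw [hlen]; omega)]
      symm
      unfold pvCnt
      rw [Nat.cast_eq_zero, List.countP_eq_zero]
      intro n hn
      rw [PySem.List.mem_pyRange_one] at hn
      simp only [beq_iff_eq]
      have hlt := pvDS_lt_len x n hn.1 hn.2
      rw [pvCountsBelow_len x hx0, ← hqdef, ← hsubdef] at hlt
      push_cast at hlt
      omega
termination_by x.toNat
decreasing_by all_goals omega

-- A's update loop characterised
theorem pvFoldl_tally (es : List Int) : ∀ (a : List Int),
    (∀ s ∈ es, 0 ≤ s ∧ s < (a.length : Int)) →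
    ((es.foldl (fun a i => PySem.List.pySetD a i (PySem.List.pyGetD a i 0 + 1)) a).length
        = a.length ∧
      ∀ t : Nat,
        (es.foldl (fun a i => PySem.List.pySetD a i (PySem.List.pyGetD a i 0 + 1)) a).getD t 0
          = a.getD t 0 + (es.countP (fun s => s == (t : Int)) : Int)) := by
  induction es with
  | nil => intro a _; simp
  | cons s es ih =>
    intro a hb
    have hs := hb s (List.mem_cons_self ..)
    have hsn : s.toNat < a.length := by omega
    have hset : PySem.List.pySetD a s (PySem.List.pyGetD a s 0 + 1)
        = a.set s.toNat (PySem.List.pyGetD a s 0 + 1) :=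
      PySem.List.pySetD_of_nonneg a _ hs.1
    simp only [List.foldl_cons]
    rw [hset]
    obtain ⟨ihlen, ihget⟩ := ih (a.set s.toNat (PySem.List.pyGetD a s 0 + 1))
      (by
        intro u hu
        rw [List.length_set]
        exact hb u (List.mem_cons_of_mem _ hu))
    refine ⟨by rw [ihlen, List.length_set], ?_⟩
    intro t
    rw [ihget t, List.countP_cons]
    have hget : (a.set s.toNat (PySem.List.pyGetD a s 0 + 1)).getD t 0
        = if s.toNat = t then a.getD t 0 + 1 else a.getD t 0 := by
      by_cases hts : s.toNat = t
      · subst hts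
        rw [if_pos rfl,
          List.getD_eq_getElem _ _ (by rw [List.length_set]; exact hsn),
          List.getElem_set_self (by rw [List.length_set]; exact hsn),
          PySem.List.pyGetD_eq_getElem a 0 hs.1 hs.2,
          List.getD_eq_getElem _ _ hsn]
      · rw [if_neg hts]
        by_cases htl : t < a.length
        · rw [List.getD_eq_getElem _ _ (by rw [List.length_set]; exact htl),
            List.getElem_set_ne hts, List.getD_eq_getElem _ _ htl]
        · rw [List.getD_eq_default _ _ (by rw [List.length_set]; omega),
            List.getD_eq_default _ _ (by omega)]
    by_cases hts : s.toNat = t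
    · have hbeq : (s == (t : Int)) = true := beq_iff_eq.mpr (by omega)
      rw [hget, if_pos hts, hbeq]
      push_cast
      simp
      omega
    · have hbeq : (s == (t : Int)) = false := by
        rw [beq_eq_false_iff_ne]
        omega
      rw [hget, if_neg hts, hbeq]
      push_cast
      simp

theorem pvPopTrail_eq (l : List Int) : pvPopTrail l = pvRdw l := by
  rcases List.eq_nil_or_concat l with rfl | ⟨l', c, rfl⟩
  · rw [pvPopTrail]
    simp [pvRdw]
  · simp only [List.concat_eq_append]
    rw [pvPopTrail]
    have hne : l' ++ [c] ≠ [] := by simp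
    rw [dif_neg hne, PySem.List.pyGetD_neg_one_append_singleton]
    by_cases hc : c = 0
    · rw [if_pos hc, List.dropLast_concat, pvPopTrail_eq l']
      unfold pvRdw
      rw [List.reverse_append]
      simp [hc]
    · rw [if_neg hc]
      unfold pvRdw
      rw [List.reverse_append]
      simp [hc]
termination_by l.length
decreasing_by
  rename_i heq
  simp only [heq, List.concat_eq_append, List.length_append, List.length_cons,
    List.length_nil]
  omega

-- trimming a table does not depend on its length beyond the support
theorem pvRdw_tab (f : Nat → Int) (S N : Nat) (hS : ∀ t, S ≤ t → f t = 0) (h : S ≤ N) :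
    pvRdw (pvTab f N) = pvRdw (pvTab f S) := by
  induction N, h using Nat.le_induction with
  | base => rfl
  | succ N hSN ih =>
    rw [← ih]
    unfold pvTab pvRdw
    rw [List.range_succ, List.map_append, List.reverse_append]
    simp [hS N hSN]

-- B's last-nonzero index loop, split at the last element
theorem pvM_append (l : List Int) (c : Int) :
    (PySem.List.enumerate (l ++ [c]) 0).foldl (fun m p => if p.2 ≠ 0 then p.1 else m) (-1)
      = if c ≠ 0 then (l.length : Int)
        else (PySem.List.enumerate l 0).foldl (fun m p => if p.2 ≠ 0 then p.1 else m) (-1) := by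
  rw [PySem.List.enumerate_append, List.foldl_append]
  simp [PySem.List.enumerate_cons, PySem.List.enumerate_nil]

theorem pvM_bounds (l : List Int) :
    -1 ≤ (PySem.List.enumerate l 0).foldl (fun m p => if p.2 ≠ 0 then p.1 else m) (-1) ∧
      (PySem.List.enumerate l 0).foldl (fun m p => if p.2 ≠ 0 then p.1 else m) (-1)
        < (l.length : Int) := by
  induction l using List.reverseRecOn with
  | nil => simp [PySem.List.enumerate_nil]
  | append_singleton l' c ih =>
    rw [pvM_append]
    by_cases hc : c = 0
    · rw [if_neg (by simp [hc])]
      simp only [List.length_append, List.length_cons, List.length_nil]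
      push_cast
      omega
    · rw [if_pos hc]
      simp only [List.length_append, List.length_cons, List.length_nil]
      push_cast
      omega

-- B's last-nonzero scan + slice is the canonical trim
theorem pvSlice_enum (l : List Int) :
    PySem.List.slice l none
        (some ((PySem.List.enumerate l 0).foldl
          (fun m p => if p.2 ≠ 0 then p.1 else m) (-1) + 1)) = pvRdw l := by
  induction l using List.reverseRecOn with
  | nil =>
    rw [show ((PySem.List.enumerate ([] : List Int) 0).foldl
        (fun m p => if p.2 ≠ 0 then p.1 else m) (-1) + 1) = 0 by
      simp [PySem.List.enumerate_nil]]
    rw [PySem.List.slice_to _ (by omega : (0:Int) ≤ 0)]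
    simp [pvRdw]
  | append_singleton l' c ih =>
    rw [pvM_append]
    have hbd := pvM_bounds l'
    set m' := (PySem.List.enumerate l' 0).foldl (fun m p => if p.2 ≠ 0 then p.1 else m) (-1)
      with hm'
    by_cases hc : c = 0
    · rw [if_neg (by simp [hc])]
      rw [PySem.List.slice_to (l' ++ [c]) (b := m' + 1) (by omega)]
      rw [List.take_append_of_le_length (by omega)]
      rw [PySem.List.slice_to l' (b := m' + 1) (by omega)] at ih
      rw [ih]
      unfold pvRdw
      rw [List.reverse_append]
      simp [hc]
    · rw [if_pos hc]
      rw [PySem.List.slice_to (l' ++ [c]) (b := (l'.length : Int) + 1) (by positivity)]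
      rw [show ((l'.length : Int) + 1).toNat = (l' ++ [c]).length by simp]
      rw [List.take_length]
      unfold pvRdw
      rw [List.reverse_append]
      simp [hc]

theorem pvCountsBelow_nil {x : Int} (h : x ≤ 0) : pvCountsBelow x = [] := by
  rw [pvCountsBelow]
  simp [h]

-- a range of nonpositive ids counts entirely at digit sum 0
theorem pvCnt_allzero (lo hi : Int) (hle : lo ≤ hi) (hneg : hi ≤ 0) :
    pvCnt lo hi 0 = hi - lo := by
  unfold pvCnt
  rw [List.countP_eq_length.mpr, PySem.List.length_pyRange_one]
  · omega
  · intro n hn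
    rw [PySem.List.mem_pyRange_one] at hn
    simp [pvDigitSum_nonpos (show n ≤ 0 by omega)]

theorem pvCnt_negrange_zero (lo hi t : Int) (hneg : hi ≤ 0) (ht : t ≠ 0) :
    pvCnt lo hi t = 0 := by
  unfold pvCnt
  rw [Nat.cast_eq_zero, List.countP_eq_zero]
  intro n hn
  rw [PySem.List.mem_pyRange_one] at hn
  simp only [beq_iff_eq]
  rw [pvDigitSum_nonpos (show n ≤ 0 by omega)]
  omega

theorem pvTab_cons (g : Nat → Int) (N : Nat) (h : 0 < N) :
    pvTab g N = g 0 :: pvTab (fun t => g (t + 1)) (N - 1) := by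
  obtain ⟨K, rfl⟩ : ∃ K, N = K + 1 := ⟨N - 1, by omega⟩
  unfold pvTab
  rw [List.range_succ_eq_map]
  simp [List.map_map, Function.comp_def]

-- B's value, in canonical form: a counts table of some length plus its support bound
theorem pvAlt_eq (nc nf : Int) (hnc : 1 ≤ nc) :
    ∃ NB : Nat,
      group_distribution_v2_alt nc nf
          = pvRdw (pvTab (fun t : Nat => pvCnt nf (nf + nc) (t : Int)) NB)
        ∧ ∀ t : Nat, NB ≤ t → pvCnt nf (nf + nc) (t : Int) = 0 := by
  simp only [group_distribution_v2_alt]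
  by_cases hhi0 : nf + nc ≤ 0
  · -- hi ≤ 0 : both tables empty, every id is negative
    refine ⟨1, ?_, ?_⟩
    · rw [pvCountsBelow_nil hhi0, pvCountsBelow_nil (show nf ≤ 0 by omega)]
      simp only [List.length_nil, Nat.cast_zero]
      rw [PySem.List.pyRange_one_eq_nil le_rfl]
      simp only [List.map_nil]
      rw [min_eq_left hhi0, if_pos (show (0:Int) < nf + nc - nf by omega)]
      show PySem.List.slice [0 + (nf + nc - nf)] none
          (some ((PySem.List.enumerate [0 + (nf + nc - nf)] 0).foldl
            (fun m p => if p.2 ≠ 0 then p.1 else m) (-1) + 1))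
        = pvRdw (pvTab (fun t : Nat => pvCnt nf (nf + nc) (t : Int)) 1)
      rw [pvSlice_enum]
      congr 1
      rw [pvTab_cons _ _ one_pos]
      congr 1
      rw [Nat.cast_zero, pvCnt_allzero nf (nf + nc) (by omega) hhi0]
      ring
    · intro t ht
      exact pvCnt_negrange_zero nf (nf + nc) _ hhi0 (by omega)
  · -- 0 < hi
    replace hhi0 : 0 < nf + nc := by omega
    have hlen9 : (pvCountsBelow (nf + nc)).length
        = (pvCountsBelow (PySem.Int.floordiv (nf + nc) 10)).length + 9 :=
      pvCountsBelow_len _ hhi0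
    have hchi_len : 0 < (pvCountsBelow (nf + nc)).length := by omega
    have hsup : ∀ t : Nat, (pvCountsBelow (nf + nc)).length ≤ t →
        pvCnt nf (nf + nc) (t : Int) = 0 := by
      intro t ht
      unfold pvCnt
      rw [Nat.cast_eq_zero, List.countP_eq_zero]
      intro n hn
      rw [PySem.List.mem_pyRange_one] at hn
      simp only [beq_iff_eq]
      by_cases hn0 : n ≤ 0
      · rw [pvDigitSum_nonpos hn0]
        omega
      · have := pvDS_lt_len (nf + nc) n (by omega) hn.2
        omega
    have hcnt : (PySem.List.pyRange 0 (((pvCountsBelow (nf + nc)).length : Int)) 1).map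
          (fun s => PySem.List.pyGetD (pvCountsBelow (nf + nc)) s 0 -
            (if s < ((pvCountsBelow nf).length : Int)
              then PySem.List.pyGetD (pvCountsBelow nf) s 0 else 0))
        = pvTab (fun t : Nat => pvCnt 0 (nf + nc) (t : Int) - pvCnt 0 nf (t : Int))
            (pvCountsBelow (nf + nc)).length := by
      apply List.ext_getElem
      · rw [List.length_map, PySem.List.length_pyRange_one]
        unfold pvTab
        rw [List.length_map, List.length_range]
        omega
      · intro t h1 h2
        simp only [List.getElem_map, PySem.List.getElem_pyRange_one, zero_add,
          pvTab, List.getElem_range]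
        rw [PySem.List.pyGetD_natCast, pvCountsBelow_getD]
        congr 1
        by_cases hg : (t : Int) < ((pvCountsBelow nf).length : Int)
        · rw [if_pos hg, PySem.List.pyGetD_natCast, pvCountsBelow_getD]
        · rw [if_neg hg]
          symm
          unfold pvCnt
          rw [Nat.cast_eq_zero, List.countP_eq_zero]
          intro n hn
          rw [PySem.List.mem_pyRange_one] at hn
          simp only [beq_iff_eq]
          have := pvDS_lt_len nf n hn.1 hn.2
          omega
    rw [hcnt]
    refine ⟨(pvCountsBelow (nf + nc)).length, ?_, hsup⟩
    by_cases hlo0 : 0 ≤ nf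
    · -- 0 ≤ nf : no negative ids, no adjustment
      rw [min_eq_right (le_of_lt hhi0), if_neg (show ¬ (0:Int) < 0 - nf by omega)]
      rw [pvSlice_enum]
      congr 1
      unfold pvTab
      apply List.map_congr_left
      intro t _
      have hsplit := pvCnt_split 0 nf (nf + nc) (t : Int) hlo0 (by omega)
      omega
    · -- nf < 0 : the negative ids all land at digit sum 0
      replace hlo0 : nf < 0 := by omega
      rw [min_eq_right (le_of_lt hhi0), if_pos (show (0:Int) < 0 - nf by omega)]
      rw [pvTab_cons _ _ hchi_len]
      rw [if_neg (by simp)]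
      rw [PySem.List.pySetD_of_nonneg _ _ le_rfl, PySem.List.pyGetD_zero_cons]
      simp only [Int.toNat_zero, List.set_cons_zero]
      rw [pvSlice_enum, pvTab_cons _ _ hchi_len]
      congr 1
      congr 1
      · -- head entry
        have hsplit := pvCnt_split nf 0 (nf + nc) 0 (by omega) (by omega)
        have hneg := pvCnt_allzero nf 0 (by omega) le_rfl
        have hnil : pvCnt 0 nf (0 : Int) = 0 := pvCnt_nil _ _ _ (by omega)
        push_cast
        omega
      · -- tail entries
        unfold pvTab
        apply List.map_congr_left
        intro t _
        have hsplit := pvCnt_split nf 0 (nf + nc) ((t : Int) + 1) (by omega) (by omega)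
        have hneg : pvCnt nf 0 ((t : Int) + 1) = 0 :=
          pvCnt_negrange_zero _ _ _ le_rfl (by omega)
        have hnil : pvCnt 0 nf ((t : Int) + 1) = 0 := pvCnt_nil _ _ _ (by omega)
        push_cast
        omega

-- ===== VERDICT (by name: the statement is the Claim_ definition above) =====
theorem group_distribution_v2_spec : Claim_equal_group_distribution_v2 := by
  intro nc nf hdom hpre
  have hds_all := pvPre_ds_all nc nf hdom hpre
  obtain ⟨hnc, -⟩ := hpre
  unfold Spec_group_distribution_v2
  have hA : group_distribution_v2 nc nf
      = pvRdw (pvTab (fun t : Nat => pvCnt nf (nf + nc) (t : Int))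
          ((PySem.Int.toChars nc).length * 9 + 1)) := by
    simp only [group_distribution_v2]
    rw [show nc + nf = nf + nc from add_comm nc nf]
    rw [PySem.List.pyRepeat_singleton]
    rw [show (((PySem.Int.toChars nc).length : Int) * 9 + 1).toNat
        = (PySem.Int.toChars nc).length * 9 + 1 by omega]
    have hball : ∀ s ∈ (PySem.List.pyRange nf (nf + nc) 1).map (fun id => pvEncLoop id 0),
        0 ≤ s ∧ s < ((List.replicate ((PySem.Int.toChars nc).length * 9 + 1) (0 : Int)).length : Int) := by
      intro s hsmem
      obtain ⟨id, hid, rfl⟩ := List.mem_map.mp hsmem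
      rw [PySem.List.mem_pyRange_one] at hid
      rw [pvEncLoop_eq, zero_add, List.length_replicate]
      refine ⟨pvDigitSum_nonneg id, ?_⟩
      have := hds_all id hid.1 hid.2
      push_cast
      omega
    obtain ⟨hlen2, hget2⟩ := pvFoldl_tally
      ((PySem.List.pyRange nf (nf + nc) 1).map (fun id => pvEncLoop id 0))
      (List.replicate ((PySem.Int.toChars nc).length * 9 + 1) (0 : Int)) hball
    rw [pvPopTrail_eq]
    congr 1
    apply List.ext_getElem
    · rw [hlen2, List.length_replicate]
      unfold pvTab
      rw [List.length_map, List.length_range]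
    · intro t h1 h2
      rw [← List.getD_eq_getElem _ 0 h1, hget2 t]
      have hrep0 : (List.replicate ((PySem.Int.toChars nc).length * 9 + 1) (0 : Int)).getD t 0
          = 0 := by
        rw [List.getD_eq_getElem?_getD, List.getElem?_replicate]
        split_ifs <;> rfl
      have hmapcp : ((PySem.List.pyRange nf (nf + nc) 1).map
            (fun id => pvEncLoop id 0)).countP (fun s => s == (t : Int))
          = (PySem.List.pyRange nf (nf + nc) 1).countP (fun n => pvDigitSum n == (t : Int)) := by
        rw [List.countP_map]
        apply List.countP_congr
        intro n _
        simp [pvEncLoop_eq]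
      rw [hrep0, zero_add, hmapcp]
      simp only [pvTab, List.getElem_map, List.getElem_range]
      unfold pvCnt
      rfl
  obtain ⟨NB, hBeq, hsupB⟩ := pvAlt_eq nc nf hnc
  have hsupA : ∀ t : Nat, (PySem.Int.toChars nc).length * 9 + 1 ≤ t →
      pvCnt nf (nf + nc) (t : Int) = 0 := by
    intro t ht
    unfold pvCnt
    rw [Nat.cast_eq_zero, List.countP_eq_zero]
    intro n hn
    rw [PySem.List.mem_pyRange_one] at hn
    simp only [beq_iff_eq]
    have := hds_all n hn.1 hn.2
    push_cast at this ⊢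
    omega
  rw [hA, hBeq]
  rcases le_total ((PySem.Int.toChars nc).length * 9 + 1) NB with hle | hle
  · rw [pvRdw_tab _ _ _ hsupA hle]
  · rw [pvRdw_tab _ _ _ hsupB hle]
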